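-- pv_equiv track=rewrite | github.com/worms618/AoC2021 | src/day13/day13.py | getDotAndFoldValues
-- ===== SOURCE A (Python) =====
-- def getDotAndFoldValues(lines):
--     dotValues = []
--     foldValues = []
--
--     listToFill = dotValues
--     for line in lines:
--         if len(line.strip()) == 0:
--             listToFill = foldValues
--             continue
--         listToFill.append(line)
--
--     return (dotValues, foldValues)
-- ===== SOURCE B (Python) =====
-- def getDotAndFoldValues(lines):
--     i = next((k for k, l in enumerate(lines) if not l.strip()), None)
--     if i is None:
--         return (list(lines), [])
--     return (list(lines[:i]), [l for l in lines[i + 1:] if l.strip()])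
-- ===== Notes on version B (the rewrite author's own statement) =====
-- stated objective: simpler
-- what changed: Replaced A's stateful single-pass toggle (an alias switched to the folds list at each blank line) by finding the first blank line's index and slicing: dots = lines before it, folds = non-blank lines after it.
import Mathlib
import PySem

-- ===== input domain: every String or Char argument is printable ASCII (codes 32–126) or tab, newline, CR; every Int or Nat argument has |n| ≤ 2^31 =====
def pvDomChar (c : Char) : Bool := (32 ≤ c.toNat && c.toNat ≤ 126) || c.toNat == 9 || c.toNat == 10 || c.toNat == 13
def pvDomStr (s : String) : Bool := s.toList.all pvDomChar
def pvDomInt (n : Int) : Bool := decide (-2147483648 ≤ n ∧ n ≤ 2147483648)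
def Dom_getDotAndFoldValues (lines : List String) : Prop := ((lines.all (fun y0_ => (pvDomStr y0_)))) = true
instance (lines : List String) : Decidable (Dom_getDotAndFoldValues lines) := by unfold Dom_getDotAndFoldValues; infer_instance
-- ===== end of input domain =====

-- B replaces A's stateful toggle ("switch the fill target at each blank line") by
-- "find the first blank line, then slice": simpler decomposition, same O(n) cost.

-- ===== PORT A =====
-- state: (dotValues, foldValues, listToFill-is-foldValues)
def pvStepA (st : List String × List String × Bool) (line : String) : List String × List String × Bool :=
  if (PySem.Str.strip line).length = 0 then (st.1, st.2.1, true)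
  else if st.2.2 then (st.1, st.2.1 ++ [line], true)
  else (st.1 ++ [line], st.2.1, false)

def getDotAndFoldValues (lines : List String) : List String × List String :=
  let r := lines.foldl pvStepA ([], [], false)
  (r.1, r.2.1)

-- ===== PORT B =====
def pvBlank (l : String) : Bool := (PySem.Str.strip l).length = 0

def getDotAndFoldValues_alt (lines : List String) : List String × List String :=
  match lines.findIdx? pvBlank with
  | none => (lines, [])
  | some i => (lines.take i, (lines.drop (i + 1)).filter (fun l => !pvBlank l))

-- ===== PRECONDITION & SPEC =====
def Spec_getDotAndFoldValues (lines : List String) (out : List String × List String) : Prop := out = getDotAndFoldValues_alt lines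
instance (lines : List String) (out : List String × List String) : Decidable (Spec_getDotAndFoldValues lines out) := by unfold Spec_getDotAndFoldValues; infer_instance

-- ===== CLAIM (what is proved, stated in full; the proofs are below) =====
def Claim_equal_getDotAndFoldValues : Prop := ∀ (lines : List String), Dom_getDotAndFoldValues lines → Spec_getDotAndFoldValues lines (getDotAndFoldValues lines)

-- ===== LEMMAS AND PROOFS =====

-- once the toggle has fired, A only appends non-blank lines to foldValues
theorem pvFoldA_true (lines : List String) (d f : List String) :
    lines.foldl pvStepA (d, f, true) = (d, f ++ lines.filter (fun l => !pvBlank l), true) := by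
  induction lines generalizing f with
  | nil => simp
  | cons l ls ih =>
    simp only [List.foldl_cons, pvStepA, List.filter_cons]
    by_cases h : (PySem.Str.strip l).length = 0 <;>
      simp [h, pvBlank, ih, List.append_assoc]

-- before the toggle fires, A's fold is characterised by the first blank line's index
theorem pvFoldA_false (lines : List String) (d f : List String) :
    lines.foldl pvStepA (d, f, false) =
      match lines.findIdx? pvBlank with
      | none => (d ++ lines, f, false)
      | some i => (d ++ lines.take i, f ++ (lines.drop (i + 1)).filter (fun l => !pvBlank l), true) := by
  induction lines generalizing d with
  | nil => simp
  | cons l ls ih =>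
    simp only [List.foldl_cons, pvStepA, List.findIdx?_cons]
    by_cases h : (PySem.Str.strip l).length = 0
    · simp [h, pvBlank, pvFoldA_true]
    · have hb : pvBlank l = false := by simp [pvBlank, h]
      rw [if_neg h, if_neg (by decide : ¬ (false = true)), ih (d ++ [l])]
      cases hfi : ls.findIdx? pvBlank <;> simp_all

-- ===== VERDICT (by name: the statement is the Claim_ definition above) =====
theorem getDotAndFoldValues_spec : Claim_equal_getDotAndFoldValues := by
  intro lines _
  unfold Spec_getDotAndFoldValues getDotAndFoldValues getDotAndFoldValues_alt
  rw [pvFoldA_false]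
  cases hfi : lines.findIdx? pvBlank <;> simp
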